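-- pv_equiv track=rewrite | github.com/pierreguillaumelaurin/aoc2023 | src/day14/day14.py | total_load
-- ===== SOURCE A (Python) =====
-- from typing import List
--
-- def total_load(matrix: List[List[str]]):
--     def single_rock_load(rock_index: int):
--         return len(matrix) - rock_index
--
--     return sum(
--         single_rock_load(i)
--         for i, row in enumerate(matrix)
--         for cell in row
--         if cell == "O"
--     )
-- ===== SOURCE B (Python) =====
-- from typing import List
--
-- def total_load(matrix: List[List[str]]):
--     # Prefix-sum accumulation: each 'O' in row i contributes 1 to the running
--     # count for rows i..n-1, so summing the running count once per row yields
--     # exactly sum over 'O' cells of (n - i), with no per-cell weights at all.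
--     running = 0
--     total = 0
--     for row in matrix:
--         running += row.count("O")
--         total += running
--     return total
-- ===== Notes on version B (the rewrite author's own statement) =====
-- stated objective: alternative
-- what changed: Replaces per-cell weight summation (each 'O' contributes len(matrix)-i via a nested generator) with a prefix-sum accumulation: keep a running count of 'O's seen so far and add that running count once per row; no row weight or index is ever computed.
import Mathlib
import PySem

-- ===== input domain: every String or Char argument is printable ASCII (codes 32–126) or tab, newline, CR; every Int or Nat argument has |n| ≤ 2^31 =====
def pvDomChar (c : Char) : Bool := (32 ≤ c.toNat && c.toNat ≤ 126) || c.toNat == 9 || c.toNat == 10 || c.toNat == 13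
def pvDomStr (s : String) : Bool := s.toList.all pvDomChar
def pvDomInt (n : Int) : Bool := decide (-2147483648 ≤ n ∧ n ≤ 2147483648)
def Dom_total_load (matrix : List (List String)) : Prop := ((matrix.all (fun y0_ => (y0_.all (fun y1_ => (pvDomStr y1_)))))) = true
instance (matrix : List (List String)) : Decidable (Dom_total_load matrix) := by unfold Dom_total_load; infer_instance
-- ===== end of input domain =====

-- B replaces the per-cell weight sum (each 'O' adds len(matrix)-i) with a prefix-sum
-- accumulation (add the running count of 'O's once per row): alternative algorithm, same cost.

-- ===== PORT A =====
-- sum( single_rock_load(i) for i, row in enumerate(matrix) for cell in row if cell == "O" )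
def total_load (matrix : List (List String)) : Int :=
  (PySem.List.enumerate matrix).foldl
    (fun acc p =>
      p.2.foldl (fun a cell => if cell == "O" then a + ((matrix.length : Int) - p.1) else a) acc)
    0

-- ===== PORT B =====
-- running = 0; total = 0; for row in matrix: running += row.count("O"); total += running
def total_load_alt (matrix : List (List String)) : Int :=
  (matrix.foldl
    (fun (s : Int × Int) row =>
      let running := s.1 + (PySem.List.count row "O" : Int)
      (running, s.2 + running))
    (0, 0)).2

-- ===== PRECONDITION & SPEC =====
def Spec_total_load (matrix : List (List String)) (out : Int) : Prop := out = total_load_alt matrix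
instance (matrix : List (List String)) (out : Int) : Decidable (Spec_total_load matrix out) := by unfold Spec_total_load; infer_instance

-- ===== CLAIM (what is proved, stated in full; the proofs are below) =====
def Claim_equal_total_load : Prop := ∀ (matrix : List (List String)), Dom_total_load matrix → Spec_total_load matrix (total_load matrix)

-- ===== LEMMAS AND PROOFS =====
-- weighted sum Σ_i (w - i) * count('O', row_i)
def pvWSum : List (List String) → Int → Int
  | [], _ => 0
  | r :: rs, w => w * (PySem.List.count r "O" : Int) + pvWSum rs (w - 1)

theorem pv_row_fold (row : List String) (w acc : Int) :
    row.foldl (fun a cell => if cell == "O" then a + w else a) acc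
      = acc + w * (row.count "O" : Int) := by
  induction row generalizing acc with
  | nil => simp
  | cons c cs ih =>
    rw [List.foldl_cons, ih, List.count_cons]
    by_cases h : c = "O"
    · simp only [h, beq_self_eq_true, if_true, Nat.cast_add, Nat.cast_one]
      ring
    · simp [h]

theorem pv_A_fold (l : List (List String)) (s : Int) (acc N : Int) :
    (PySem.List.enumerate l s).foldl
        (fun a p => p.2.foldl (fun a cell => if cell == "O" then a + (N - p.1) else a) a) acc
      = acc + pvWSum l (N - s) := by
  induction l generalizing s acc with
  | nil => simp [PySem.List.enumerate_nil, pvWSum]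
  | cons r rs ih =>
    simp only [PySem.List.enumerate_cons, List.foldl_cons]
    rw [pv_row_fold, ih, pvWSum, PySem.List.count_eq]
    ring_nf

theorem pv_B_fold (l : List (List String)) (run tot : Int) :
    (l.foldl
        (fun (s : Int × Int) row =>
          let running := s.1 + (PySem.List.count row "O" : Int)
          (running, s.2 + running))
        (run, tot)).2
      = tot + (l.length : Int) * run + pvWSum l (l.length : Int) := by
  induction l generalizing run tot with
  | nil => simp [pvWSum]
  | cons r rs ih =>
    simp only [List.foldl_cons]
    rw [ih, pvWSum]
    have h : ((r :: rs).length : Int) - 1 = (rs.length : Int) := by simp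
    simp only [List.length_cons]
    push_cast
    have h2 : (rs.length : Int) + 1 - 1 = (rs.length : Int) := by ring
    rw [h2]
    ring

-- ===== VERDICT (by name: the statement is the Claim_ definition above) =====
theorem total_load_spec : Claim_equal_total_load := by
  intro matrix _
  unfold Spec_total_load total_load total_load_alt
  rw [pv_A_fold, pv_B_fold]
  simp
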